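-- pv_equiv track=rewrite | github.com/nraistrick/algorithms | string_algorithms.py | find_unique_substrings
-- ===== SOURCE A (Python) =====
-- def find_unique_substrings(first, second):
--     """
--     For two strings, find the unique substrings that are present only once in
--     both strings. In this case, we produce the substrings in order of shortest
--     first.
--
--     To calculate the runtime of this algorithm, we define the length the first
--     string as 'a' and the length of the second string as 'b'. We can see that
--     there are approximately 'a' outer loops, and determine that there are two
--     further nested inner loops with an average number of iterations of (a-1)/2
--     and (b-1)/2 respectively.
--
--     * This implementation's runtime is approximately O(a * (a-1)/2 * (b-1)/2)
--     * Its space complexity is O(1)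
--
--     :param str first: The first string
--     :param str second: The second string
--     :rtype: str
--     """
--     for unique_character_count in range(1, len(first)):
--         for f in range(len(first) + 1 - unique_character_count):
--             unique_chars = first[f: f + unique_character_count]
--
--             unique = False
--             for k in range(len(second) + 1 - unique_character_count):
--                 if unique_chars == second[k: k + unique_character_count]:
--                     if unique:
--                         unique = False
--                         break
--                     unique = True
--
--             if unique:
--                 yield unique_chars
-- ===== SOURCE B (Python) =====
-- def find_unique_substrings(first, second):
--     """Same output as A, but per length a hash counter over second's substrings
--     replaces the inner scan of second for every start in first."""
--     a, b = len(first), len(second)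
--     for length in range(1, a):
--         counts = {}
--         for k in range(b + 1 - length):
--             sub = second[k:k + length]
--             counts[sub] = counts.get(sub, 0) + 1
--         for f in range(a + 1 - length):
--             sub = first[f:f + length]
--             if counts.get(sub, 0) == 1:
--                 yield sub
-- ===== Notes on version B (the rewrite author's own statement) =====
-- stated objective: faster
-- what changed: Per substring length, B builds a hash counter of all of second's substrings of that length once, so the per-start rescan of second (A's toggling inner loop) disappears; membership count is then one dict lookup.
import Mathlib
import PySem

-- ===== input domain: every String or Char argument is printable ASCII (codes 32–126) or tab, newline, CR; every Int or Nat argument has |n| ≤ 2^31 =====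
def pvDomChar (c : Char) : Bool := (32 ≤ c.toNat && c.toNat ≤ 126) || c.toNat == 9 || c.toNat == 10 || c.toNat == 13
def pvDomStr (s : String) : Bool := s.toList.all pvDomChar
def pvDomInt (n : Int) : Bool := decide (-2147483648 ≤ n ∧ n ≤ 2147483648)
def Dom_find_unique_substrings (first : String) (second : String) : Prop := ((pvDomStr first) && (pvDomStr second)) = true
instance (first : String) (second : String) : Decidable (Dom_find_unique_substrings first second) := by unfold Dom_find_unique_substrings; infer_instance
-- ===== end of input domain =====

-- B replaces A's per-start rescan of `second` by a per-length counter dict over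
-- `second`'s substrings built once (objective: faster; both ports are total).

-- ===== PORT A =====
-- A's innermost loop over k, with the toggling `unique` flag and its `break`
-- (a `break` returns the current value of the flag, which the break just set to false).
def fusInnerGo (sub : String) (second : String) (L : Int) :
    List Int → Bool → Bool
  | [], unique => unique
  | k :: ks, unique =>
    if PySem.Str.slice second (some k) (some (k + L)) == sub then
      if unique then false
      else fusInnerGo sub second L ks true
    else fusInnerGo sub second L ks unique

def find_unique_substrings (first : String) (second : String) : List String :=
  (PySem.List.pyRange 1 (PySem.Str.len first : Int) 1).foldl (fun acc L =>
    (PySem.List.pyRange 0 ((PySem.Str.len first : Int) + 1 - L) 1).foldl (fun acc f =>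
      let unique_chars := PySem.Str.slice first (some f) (some (f + L))
      if fusInnerGo unique_chars second L
          (PySem.List.pyRange 0 ((PySem.Str.len second : Int) + 1 - L) 1) false
      then acc ++ [unique_chars] else acc) acc) []

-- ===== PORT B =====
def find_unique_substrings_alt (first : String) (second : String) : List String :=
  (PySem.List.pyRange 1 (PySem.Str.len first : Int) 1).foldl (fun acc L =>
    let counts : PySem.Dict String Int :=
      (PySem.List.pyRange 0 ((PySem.Str.len second : Int) + 1 - L) 1).foldl (fun d k =>
        let sub := PySem.Str.slice second (some k) (some (k + L))
        d.insert sub (d.getD sub 0 + 1)) PySem.Dict.empty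
    (PySem.List.pyRange 0 ((PySem.Str.len first : Int) + 1 - L) 1).foldl (fun acc f =>
      let sub := PySem.Str.slice first (some f) (some (f + L))
      if counts.getD sub 0 == 1 then acc ++ [sub] else acc) acc) []

-- ===== PRECONDITION & SPEC =====
def Spec_find_unique_substrings (first : String) (second : String) (out : List String) : Prop := out = find_unique_substrings_alt first second
instance (first : String) (second : String) (out : List String) : Decidable (Spec_find_unique_substrings first second out) := by unfold Spec_find_unique_substrings; infer_instance

-- ===== CLAIM (what is proved, stated in full; the proofs are below) =====
def Claim_equal_find_unique_substrings : Prop := ∀ (first : String) (second : String), Dom_find_unique_substrings first second → Spec_find_unique_substrings first second (find_unique_substrings first second)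

-- ===== LEMMAS AND PROOFS =====

-- A's inner loop computes "exactly one match": with the flag still false it
-- returns (# matches == 1), with the flag already true it returns (# matches == 0).
theorem fusInnerGo_spec (sub second : String) (L : Int) (ks : List Int) :
    (fusInnerGo sub second L ks false
      = ((ks.map (fun k => PySem.Str.slice second (some k) (some (k + L)))).count sub == 1)) ∧
    (fusInnerGo sub second L ks true
      = ((ks.map (fun k => PySem.Str.slice second (some k) (some (k + L)))).count sub == 0)) := by
  induction ks with
  | nil => simp [fusInnerGo]
  | cons k ks ih =>
    simp only [fusInnerGo, List.map_cons, List.count_cons]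
    by_cases h : PySem.Str.slice second (some k) (some (k + L)) == sub
    · refine ⟨?_, ?_⟩ <;>
        · simp only [h, if_true, ih.1, ih.2]
          cases hc : (ks.map (fun k => PySem.Str.slice second (some k) (some (k + L)))).count sub <;>
            simp
    · simp [h, ih.1, ih.2]

-- B's counter holds the same per-length occurrence counts.
theorem counts_getD (second : String) (L : Int) (ks : List Int) (sub : String) :
    ((ks.foldl (fun d k =>
        let s := PySem.Str.slice second (some k) (some (k + L))
        d.insert s (d.getD s 0 + 1)) (PySem.Dict.empty : PySem.Dict String Int)).getD sub 0)
      = ((ks.map (fun k => PySem.Str.slice second (some k) (some (k + L)))).count sub : Int) := by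
  have h := PySem.Dict.getD_foldl_insert_add_one
    (l := ks.map (fun k => PySem.Str.slice second (some k) (some (k + L))))
    (d := (PySem.Dict.empty : PySem.Dict String Int)) (v := sub)
  rw [List.foldl_map] at h
  simpa using h

-- ===== VERDICT (by name: the statement is the Claim_ definition above) =====
theorem find_unique_substrings_spec : Claim_equal_find_unique_substrings := by
  intro first second _
  unfold Spec_find_unique_substrings find_unique_substrings find_unique_substrings_alt
  refine PySem.List.foldl_congr_mem _ _ _ _ ?_
  intro acc L _
  refine PySem.List.foldl_congr_mem _ _ _ _ ?_
  intro acc f _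
  simp only [(fusInnerGo_spec _ second L _).1, counts_getD]
  by_cases hc : ((PySem.List.pyRange 0 ((PySem.Str.len second : Int) + 1 - L) 1).map
      (fun k => PySem.Str.slice second (some k) (some (k + L)))).count
      (PySem.Str.slice first (some f) (some (f + L))) = 1 <;>
    simp
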